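/- GENERATED by tools/from_farm_form.py from prooffarm-gif/accepted/digest_file.5/Lemmas.lean (a worked proof of the farm's unit `digest_file.5`,
   accepted by the verdict) — do not edit. -/
import Gif.Code
import Gif.Dec.All
import Gif.Labels
import Gif.Spec.AllSegs

/-!
  Unit `digest_file.5` (10591AH … 10594BH, gif_driver.c:164-166): the pure part.

  `seg5_where`        where the counted slot `sp = s.arr + 56·k` of a round lies (numbers), and that the array is live
  `seg5_round_carry`  `Round` from one state of the round to a later one that stored only BELOW the locals
                      (`[RA − 224, RA − 88)`: the return addresses of the calls and the callees' frames)
  `seg5_call1`        10591AH … 105925H: `digest_int(h, Width)`; `Round` at its return (`ret22`)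
  `seg5_call2`        105925H … 105930H: `digest_int(h, Height)`; `Round` at its return (`ret23`)
  `seg5_call3`        105930H … 10594BH: the checked byte load of `Interlace`, `digest_int`; `Round` at the exit cut
-/
namespace Gif.Spec.digest_file_5
open X86 X86.User Asan ProgX.Base ProgX.Base.Spec Gif.Spec

/-- **Where the slot of a round lies.** With `k < length` there is the array `s` of the forest: it is a live heap object of
`56 · s.cap` bytes above `800040H`, ending below `C00000H`, and `k < s.cap`: the slot `[s.arr + 56·k, s.arr + 56·k + 56)` lies inside
it. This is what the check at 105937H (`sp + 16`, one byte) and the carry of `Round.n` (the slot is off the stack) need. -/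
theorem seg5_where {cut : Word} {m : Nat} {H : Heap} {rest : List Obj} {frames : List (Nat × FrameLayout)} {F : Forest} {R : Rd}
    {u₀ e : State} {ret : Word} {v : State}
    (hr : digest_file.Round cut m H rest frames F R u₀ e ret v) :
    ∃ s : Saved, F.saved = some s ∧ (v.reg .rbx).toNat = s.arr + 56 * (v.reg .r13).toNat ∧
      (v.reg .r13).toNat < s.cap ∧ H.Live s.arr (56 * s.cap) ∧ 0x800040 ≤ s.arr ∧ s.arr + 56 * s.cap + 32 ≤ 0xC00000 := by
  obtain ⟨s, hs, hrbx⟩ := hr.sp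
  have hk := hr.k_lt
  obtain ⟨s', hk', hs', _, hcap, _⟩ := digest_file.slotAt hr.at_.ok.shape hk
  rw [hs] at hs'
  have hss : s = s' := Option.some.inj hs'
  subst hss
  have hlive : H.Live s.arr (56 * s.cap) := digest_file.owns_arr hr.at_.ok hs
  have hrange := hlive.range hr.at_.pre.1.heap.base hr.at_.inv.heap
  refine ⟨s, hs, hrbx, ?_, hlive, hrange.1, hrange.2⟩
  omega

/-- **`Round` THROUGH A STEP THAT STORED ONLY BELOW THE LOCALS** (`[RA − 224, RA − 88)`: the return addresses of the round's calls at
`[RA − 96, RA − 88)` and the callees' frames) and not into the shadow, with `rsp`, `r12`, `r13`, `rbx`, `rbp` as they were: `At` by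
`digest_file.At.carry`; the slot of `ImageCount` (`RA − 76`) lies above the window; the slot's `Width` and `Height` lie in the heap. -/
theorem seg5_round_carry {cut cut' : Word} {m : Nat} {H : Heap} {rest : List Obj} {frames : List (Nat × FrameLayout)} {F : Forest}
    {R : Rd} {u₀ e : State} {ret : Word} {v s : State}
    (hr : digest_file.Round cut m H rest frames F R u₀ e ret v)
    (hrip : s.rip = cut') (hrsp : s.reg .rsp = e.reg .rsp - 88) (hr12 : s.reg .r12 = v.reg .r12)
    (hr13 : s.reg .r13 = v.reg .r13) (hrbx : s.reg .rbx = v.reg .rbx) (hrbp : s.reg .rbp = v.reg .rbp)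
    (hcode : (conv u₀).code.In s.mem) (habi : (conv u₀).inv s)
    (hun : ShadowUntouched v.mem s.mem)
    (hsame : Mem.SameExcept [⟨(e.reg .rsp).toNat - 224, (e.reg .rsp).toNat - 88⟩] v.mem s.mem) :
    digest_file.Round cut' m H rest frames F R u₀ e ret s := by
  have he_room := hr.at_.entry.room
  have he_top := hr.at_.entry.top
  simp only [vspec, ProgX.conv_stackLo, ProgX.conv_stackHi] at he_room he_top
  obtain ⟨sv, hsv, hbx, hkcap, _, hlo, hhi⟩ := seg5_where hr
  -- the wider window of `At.carry`
  have hsame' : Mem.SameExcept [⟨(e.reg .rsp).toNat - 224, (e.reg .rsp).toNat - 64⟩] v.mem s.mem := by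
    refine hsame.mono ?_
    intro w hw a ha1 ha2
    have hw_eq := List.mem_singleton.mp hw
    rw [hw_eq] at ha1 ha2
    refine ⟨_, List.mem_singleton.mpr rfl, ?_, ?_⟩
    · exact ha1
    · simp only at ha2 ⊢
      omega
  have hat' := hr.at_.carry (cut' := cut') hrip hrsp hr12 hcode habi hun hsame'
  -- a field of the slot: in the heap, above the stack
  have hfield : ∀ (off n : Nat), off + n ≤ 56 →
      rd s.mem ((v.reg .rbx).toNat + off) n = rd v.mem ((v.reg .rbx).toNat + off) n := by
    intro off n hoff
    refine hsame.rd _ n (by omega) ?_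
    intro w hw
    have hw_eq := List.mem_singleton.mp hw
    rw [hw_eq]
    right
    simp only
    omega
  exact {
    at_ := hat'
    s_count := by
      refine slot_sameExcept hsame (e.reg .rsp) 76 4 _ (by omega) (by omega) hr.s_count ?_
      intro w hw
      have hw_eq := List.mem_singleton.mp hw
      rw [hw_eq]
      right
      simp only
      omega
    k_lt := by
      rw [hr13]
      exact hr.k_lt
    measure := by
      rw [hr13]
      exact hr.measure
    sp := by
      rw [hr13, hrbx]
      exact hr.sp
    n := by
      rw [hrbp, hrbx]
      simp only [gfield]
      rw [hfield 8 4 (by omega), hfield 12 4 (by omega)]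
      have hn := hr.n
      simp only [gfield] at hn
      exact hn
  }

set_option maxRecDepth 4000 in
set_option maxHeartbeats 4000000 in
/-- **10591AH … 105925H** (gif_driver.c:164): `rdi = h`, `esi = r15d` (Width), `digest_int`; at its return `Round` holds again
(the callee wrote the return-address slot `[RA − 96, RA − 88)` and its 16 bytes of stack below it; `rbx rbp r12 r13` are callee-saved). -/
theorem seg5_call1 {Lay : Layout} (hLay : Lay.hi = 0x1000000) {μ : Microarch} (hμ : UserX.MicroOK μ) {u₀ : State}
    (hcode : HasCodeNat Lay u₀ Gif.L.digest_file.entry Gif.Code.code_digest_file.nat Gif.L.digest_file.size)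
    (h_int : Calls Lay μ ProgX.Base.WayInv (ProgX.Base.conv u₀) Gif.L.digest_int.entry Gif.Spec.digest_int.spec)
    {H : Heap} {rest : List Obj} {frames : List (Nat × FrameLayout)} {F : Forest} {R : Rd} {e : State} {ret : Word} {m : Nat}
    {v : State}
    (hr : digest_file.Round Gif.L.digest_file.at_10591a m H rest frames F R u₀ e ret v) :
    ReachVia Lay μ WayInv v (digest_file.Round Gif.L.digest_file.ret22 m H rest frames F R u₀ e ret) := by
  have hat := hr.at_
  have he := hat.entry
  v_entry he
  have w_rip := hat.rip
  have c_rsp : v.reg .rsp = e.reg .rsp - 88 := hat.rsp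
  have w_eq : Mem.EqOn ProgX.Base.L.textLo ProgX.Base.L.textHi u₀.mem v.mem := ProgX.Base.conv_code_eqOn hat.code
  have hdf : v.flags .df = false := (show abiInv _ from hat.abi).1
  have hmx : v.mxcsr &&& 0x1F80 = 0x1F80 := (show abiInv _ from hat.abi).2
  have hsse := ProgX.Base.sseOK_of_abiInv hat.abi
  have w_kept : RegsKept [.rsp] v v := RegsKept.refl _ _
  u_walk hcode [hμ.vendor]
    until [Gif.L.digest_file.at_10594b]
    span [ProgX.Base.L.textLo, ProgX.Base.L.textHi] side (v_side)
  case call_inv =>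
    v_inv
  case pre_105920 =>
    trivial
  -- 0x105925: digest_int has returned; it wrote its 16 bytes of stack below the return address only
  v_after_call w_rsp_105920 w_mem_105920
  have hsame : Mem.SameExcept [⟨(e.reg .rsp).toNat - 224, (e.reg .rsp).toNat - 88⟩] v.mem s_105920r.mem := by
    u_same
  have hun : ShadowUntouched v.mem s_105920r.mem := by
    v_untouched
  exact ReachVia.done (seg5_round_carry hr w_rip w_rsp (w_kept.get .r12 rfl) (w_kept.get .r13 rfl) (w_kept.get .rbx rfl)
    (w_kept.get .rbp rfl) w_code w_inv hun hsame)

set_option maxRecDepth 4000 in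
set_option maxHeartbeats 4000000 in
/-- **105925H … 105930H** (gif_driver.c:165): `rdi = h`, `esi = r14d` (Height), `digest_int`; at its return `Round` holds again
(as in `seg5_call1`). -/
theorem seg5_call2 {Lay : Layout} (hLay : Lay.hi = 0x1000000) {μ : Microarch} (hμ : UserX.MicroOK μ) {u₀ : State}
    (hcode : HasCodeNat Lay u₀ Gif.L.digest_file.entry Gif.Code.code_digest_file.nat Gif.L.digest_file.size)
    (h_int : Calls Lay μ ProgX.Base.WayInv (ProgX.Base.conv u₀) Gif.L.digest_int.entry Gif.Spec.digest_int.spec)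
    {H : Heap} {rest : List Obj} {frames : List (Nat × FrameLayout)} {F : Forest} {R : Rd} {e : State} {ret : Word} {m : Nat}
    {v : State}
    (hr : digest_file.Round Gif.L.digest_file.ret22 m H rest frames F R u₀ e ret v) :
    ReachVia Lay μ WayInv v (digest_file.Round Gif.L.digest_file.ret23 m H rest frames F R u₀ e ret) := by
  have hat := hr.at_
  have he := hat.entry
  v_entry he
  have w_rip := hat.rip
  have c_rsp : v.reg .rsp = e.reg .rsp - 88 := hat.rsp
  have w_eq : Mem.EqOn ProgX.Base.L.textLo ProgX.Base.L.textHi u₀.mem v.mem := ProgX.Base.conv_code_eqOn hat.code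
  have hdf : v.flags .df = false := (show abiInv _ from hat.abi).1
  have hmx : v.mxcsr &&& 0x1F80 = 0x1F80 := (show abiInv _ from hat.abi).2
  have hsse := ProgX.Base.sseOK_of_abiInv hat.abi
  have w_kept : RegsKept [.rsp] v v := RegsKept.refl _ _
  u_walk hcode [hμ.vendor]
    until [Gif.L.digest_file.at_10594b]
    span [ProgX.Base.L.textLo, ProgX.Base.L.textHi] side (v_side)
  case call_inv =>
    v_inv
  case pre_10592b =>
    trivial
  -- 0x105930: digest_int has returned; it wrote its 16 bytes of stack below the return address only
  v_after_call w_rsp_10592b w_mem_10592b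
  have hsame : Mem.SameExcept [⟨(e.reg .rsp).toNat - 224, (e.reg .rsp).toNat - 88⟩] v.mem s_10592br.mem := by
    u_same
  have hun : ShadowUntouched v.mem s_10592br.mem := by
    v_untouched
  exact ReachVia.done (seg5_round_carry hr w_rip w_rsp (w_kept.get .r12 rfl) (w_kept.get .r13 rfl) (w_kept.get .rbx rfl)
    (w_kept.get .rbp rfl) w_code w_inv hun hsame)

set_option maxRecDepth 4000 in
set_option maxHeartbeats 4000000 in
/-- **105930H … 10594BH** (gif_driver.c:166): `r14 = h`, the checked byte load of `sp->ImageDesc.Interlace` (`sp + 16`: inside the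
live array `(s.arr, 56 · s.cap)`, `k < cap`), `digest_int`, `r14 = h`: `Round` at the exit cut 10594BH. -/
theorem seg5_call3 {Lay : Layout} (hLay : Lay.hi = 0x1000000) {μ : Microarch} (hμ : UserX.MicroOK μ) {u₀ : State}
    (hcode : HasCodeNat Lay u₀ Gif.L.digest_file.entry Gif.Code.code_digest_file.nat Gif.L.digest_file.size)
    (h_int : Calls Lay μ ProgX.Base.WayInv (ProgX.Base.conv u₀) Gif.L.digest_int.entry Gif.Spec.digest_int.spec)
    (h_load1 : Asan.SmallCheck Lay μ ProgX.Base.WayInv (ProgX.Base.CodeOK u₀) [.rax, .rdx] 1 ProgX.Base.L.__asan_load1_noabort.entry)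
    {H : Heap} {rest : List Obj} {frames : List (Nat × FrameLayout)} {F : Forest} {R : Rd} {e : State} {ret : Word} {m : Nat}
    {v : State}
    (hr : digest_file.Round Gif.L.digest_file.ret23 m H rest frames F R u₀ e ret v) :
    ReachVia Lay μ WayInv v (digest_file.Round Gif.L.digest_file.at_10594b m H rest frames F R u₀ e ret) := by
  have hat := hr.at_
  have he := hat.entry
  v_entry he
  obtain ⟨sv, hsv, hbx, hkcap, hlive, hlo, hhi⟩ := seg5_where hr
  have hla : LiveIn (H.liveObjs ++ rest) frames sv.arr (56 * sv.cap) := hlive.liveIn rest frames (Nat.le_refl _) (Nat.le_refl _)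
  have w_rip := hat.rip
  have c_rsp : v.reg .rsp = e.reg .rsp - 88 := hat.rsp
  have w_eq : Mem.EqOn ProgX.Base.L.textLo ProgX.Base.L.textHi u₀.mem v.mem := ProgX.Base.conv_code_eqOn hat.code
  have hdf : v.flags .df = false := (show abiInv _ from hat.abi).1
  have hmx : v.mxcsr &&& 0x1F80 = 0x1F80 := (show abiInv _ from hat.abi).2
  have hsse := ProgX.Base.sseOK_of_abiInv hat.abi
  have w_kept : RegsKept [.rsp] v v := RegsKept.refl _ _
  u_walk hcode [hμ.vendor]
    until [Gif.L.digest_file.at_10594b]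
    span [ProgX.Base.L.textLo, ProgX.Base.L.textHi] side (v_side)
  case check_105937 =>
    -- 0x105937, gif_driver.c:166: the check of the byte load `sp->ImageDesc.Interlace` (`sp + 16`): inside the live array
    have hun : ShadowUntouched v.mem s_105937.mem := by v_untouched
    exact hla.accSmall hat.inv.shadow hun _ 1 (by decide) (by u_omega) (by u_omega)
  case call_inv =>
    v_inv
  case pre_105943 =>
    trivial
  -- 0x105948: digest_int has returned; it wrote its 16 bytes of stack below the return address only
  v_after_call w_rsp_105943 w_mem_105943
  have hsame : Mem.SameExcept [⟨(e.reg .rsp).toNat - 224, (e.reg .rsp).toNat - 88⟩] v.mem s_105943r.mem := by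
    u_same
  have hun : ShadowUntouched v.mem s_105943r.mem := by
    v_untouched
  u_walk hcode [hμ.vendor]
    until [Gif.L.digest_file.at_10594b]
    span [ProgX.Base.L.textLo, ProgX.Base.L.textHi] side (v_side)
  -- 0x10594b, gif_driver.c:167: `r14 = h`; the memory is the returned one
  have habi : (conv u₀).inv s_105948 := by
    refine ProgX.Base.abiInv_of ?_ ?_
    · rw [w_flags]
      exact w_df
    · rw [w_mxcsr]
      exact w_mx
  rw [← w_mem] at hsame hun
  exact ReachVia.done (seg5_round_carry hr w_rip w_rsp (w_kept.get .r12 rfl) (w_kept.get .r13 rfl) (w_kept.get .rbx rfl)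
    (w_kept.get .rbp rfl) (ProgX.Base.conv_code_in w_eq) habi hun hsame)

end Gif.Spec.digest_file_5
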